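-- pv_equiv track=rewrite | github.com/Tawana2000/Python | Python Intermediate Challenges/extend-vowels.py | extend_vowels
-- ===== SOURCE A (Python) =====
-- def extend_vowels(string, n):
--
--     vowels = "AEIOUaeiou"
--     result = []
--
--     for char in string:
--         if char in vowels:
--             result.append(char * n)
--
--         else:
--             result.append(char)
--
--     return ''.join(result)
-- ===== SOURCE B (Python) =====
-- def extend_vowels(string, n):
--     table = {ord(v): v * n for v in "AEIOUaeiou" if v in string}
--     return string.translate(table)
-- ===== Notes on version B (the rewrite author's own statement) =====
-- stated objective: idiomatic
-- what changed: B precomputes a codepoint-to-replacement translation table for the vowels occurring in the string and delegates the whole character scan to str.translate, removing A's explicit loop and list accumulation.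
import Mathlib
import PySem

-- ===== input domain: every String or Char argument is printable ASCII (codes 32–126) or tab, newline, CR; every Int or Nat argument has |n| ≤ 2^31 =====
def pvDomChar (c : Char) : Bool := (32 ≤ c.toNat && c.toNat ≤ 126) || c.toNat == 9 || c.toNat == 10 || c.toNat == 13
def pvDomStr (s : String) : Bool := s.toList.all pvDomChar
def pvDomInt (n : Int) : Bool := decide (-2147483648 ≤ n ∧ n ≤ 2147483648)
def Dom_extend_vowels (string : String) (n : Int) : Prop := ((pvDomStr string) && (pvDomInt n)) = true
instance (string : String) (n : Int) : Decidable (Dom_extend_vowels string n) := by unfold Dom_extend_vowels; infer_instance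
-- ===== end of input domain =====

-- B replaces A's explicit per-character loop with a precomputed vowel→replacement
-- translation table and a single translate pass (idiomatic; return value only).

-- ===== PORT A =====
def extend_vowels (string : String) (n : Int) : String :=
  String.ofList (PySem.Chars.join []
    (string.toList.foldl (fun result char =>
      if ("AEIOUaeiou".toList.contains char) then
        result ++ [PySem.List.pyRepeat [char] n]   -- char * n
      else
        result ++ [[char]]) []))

-- ===== PORT B =====
-- the translation table {ord(v): v*n for v in "AEIOUaeiou" if v in string};
-- keys kept as Char (ord is injective on Char, so the Char-keyed dict is an exact model)
def evTable (string : String) (n : Int) : PySem.Dict Char (List Char) :=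
  "AEIOUaeiou".toList.foldl
    (fun d v => if string.toList.contains v then d.insert v (PySem.List.pyRepeat [v] n) else d)
    PySem.Dict.empty

-- str.translate ported by hand: each character is replaced by its table entry,
-- a character absent from the table is kept; exact on the ASCII domain
def extend_vowels_alt (string : String) (n : Int) : String :=
  String.ofList (string.toList.flatMap (fun c => (evTable string n).getD c [c]))

-- ===== PRECONDITION & SPEC =====
def Spec_extend_vowels (string : String) (n : Int) (out : String) : Prop := out = extend_vowels_alt string n
instance (string : String) (n : Int) (out : String) : Decidable (Spec_extend_vowels string n out) := by unfold Spec_extend_vowels; infer_instance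

-- ===== CLAIM (what is proved, stated in full; the proofs are below) =====
def Claim_equal_extend_vowels : Prop := ∀ (string : String) (n : Int), Dom_extend_vowels string n → Spec_extend_vowels string n (extend_vowels string n)

-- ===== LEMMAS AND PROOFS =====

theorem getD_foldl_condInsert (f : Char → List Char) (p : Char → Bool) (vs : List Char)
    (d : PySem.Dict Char (List Char)) (c : Char) (dflt : List Char) :
    (vs.foldl (fun d v => if p v then d.insert v (f v) else d) d).getD c dflt =
      if c ∈ vs ∧ p c = true then f c else d.getD c dflt := by
  induction vs generalizing d with
  | nil => simp
  | cons v vs ih =>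
    simp only [List.foldl, ih]
    by_cases hm : c ∈ vs ∧ p c = true <;> by_cases hv : c = v <;> by_cases hp : p v = true <;>
      simp_all [PySem.Dict.getD_insert]

theorem evTable_getD (s : String) (n : Int) (c : Char) (hc : c ∈ s.toList) :
    (evTable s n).getD c [c] =
      if ("AEIOUaeiou".toList.contains c) then PySem.List.pyRepeat [c] n else [c] := by
  rw [evTable, getD_foldl_condInsert, PySem.Dict.getD_empty]
  have hcc : s.toList.contains c = true := by simpa using hc
  simp only [hcc, and_true]
  simp only [List.contains_eq_mem, decide_eq_true_eq]

theorem evJoin (l : List (List Char)) : PySem.Chars.join [] l = l.flatten := by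
  induction l with
  | nil => rfl
  | cons x xs ih =>
    cases xs <;> simp_all [PySem.Chars.join, List.intercalate, List.intersperse]

theorem evFlat {α β : Type} (l : List α) (f : α → List β) :
    (l.flatMap (fun x => [f x])).flatten = l.flatMap f := by
  induction l <;> simp_all

theorem evCongrMem {α β : Type} (l : List α) (f g : α → List β)
    (h : ∀ x ∈ l, f x = g x) : l.flatMap f = l.flatMap g := by
  induction l <;> simp_all

-- ===== VERDICT (by name: the statement is the Claim_ definition above) =====
theorem extend_vowels_spec : Claim_equal_extend_vowels := by
  intro s n _
  unfold Spec_extend_vowels extend_vowels extend_vowels_alt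
  have hg : (fun (result : List (List Char)) char =>
      if ("AEIOUaeiou".toList.contains char) then
        result ++ [PySem.List.pyRepeat [char] n] else result ++ [[char]]) =
      (fun result char => result ++ (if ("AEIOUaeiou".toList.contains char) then
        [PySem.List.pyRepeat [char] n] else [[char]])) := by
    funext r c; split <;> rfl
  have h := PySem.List.foldl_append_eq_flatMap
    (l := s.toList) (acc := ([] : List (List Char)))
    (g := fun char => if ("AEIOUaeiou".toList.contains char) then
        [PySem.List.pyRepeat [char] n] else [[char]])
  rw [hg, h, evJoin]
  simp only [List.nil_append, ← apply_ite (fun x : List Char => [x])]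
  rw [evFlat]
  exact congrArg String.ofList (evCongrMem _ _ _ (fun c hc => (evTable_getD s n c hc).symm))
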